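-- pv_equiv track=rewrite | github.com/Solomonz/Binary-Image-Compressor | image_compressor.py | calculate_pairwise_encoding
-- ===== SOURCE A (Python) =====
-- from math import ceil, inf, log2
--
-- def num_to_bits(n, num_bits):
--     assert 0 <= n < 2**num_bits
--     return [1 if n & 2**i else 0 for i in range(num_bits - 1, -1, -1)]
--
-- def calculate_pairwise_encoding(run_length_array, first_bit, zero_len, one_len):
--     max_zeros = 2**zero_len - 1
--     max_ones = 2**one_len - 1
--
--     out = []
--     cur_run_bit = first_bit
--
--     for r in run_length_array:
--         cur_max_len = max_ones if cur_run_bit else max_zeros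
--         cur_bit_len = one_len if cur_run_bit else zero_len
--         alternate_bit_len = zero_len if cur_run_bit else one_len
--         while r > cur_max_len:
--             out.extend(num_to_bits(cur_max_len, cur_bit_len))
--             out.extend(num_to_bits(0, alternate_bit_len))
--             r -= cur_max_len
--         out.extend(num_to_bits(r, cur_bit_len))
--         cur_run_bit = 1 - cur_run_bit
--     return ceil((len(out) + 4 + 4 + 1) / 8), out
-- ===== SOURCE B (Python) =====
-- from math import ceil
--
-- def num_to_bits(n, num_bits):
--     assert 0 <= n < 2**num_bits
--     return [1 if n & 2**i else 0 for i in range(num_bits - 1, -1, -1)]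
--
-- def calculate_pairwise_encoding(run_length_array, first_bit, zero_len, one_len):
--     one_params = (2**one_len - 1, one_len, zero_len)
--     zero_params = (2**zero_len - 1, zero_len, one_len)
--     out = []
--     bit = first_bit
--     for r in run_length_array:
--         m, bl, abl = one_params if bit else zero_params
--         k = (r - 1) // m if r > m else 0
--         if k:
--             out += (num_to_bits(m, bl) + num_to_bits(0, abl)) * k
--         out += num_to_bits(r - k * m, bl)
--         bit = 1 - bit
--     return ceil((len(out) + 4 + 4 + 1) / 8), out
-- ===== Notes on version B (the rewrite author's own statement) =====
-- stated objective: alternative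
-- what changed: Each run's repeated-subtraction while-loop (emit max-chunk, subtract, repeat) is replaced by a closed-form chunk count k = (r-1)//cur_max (when r > cur_max) with one list multiplication of the prebuilt chunk plus the remainder bits.
import Mathlib
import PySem

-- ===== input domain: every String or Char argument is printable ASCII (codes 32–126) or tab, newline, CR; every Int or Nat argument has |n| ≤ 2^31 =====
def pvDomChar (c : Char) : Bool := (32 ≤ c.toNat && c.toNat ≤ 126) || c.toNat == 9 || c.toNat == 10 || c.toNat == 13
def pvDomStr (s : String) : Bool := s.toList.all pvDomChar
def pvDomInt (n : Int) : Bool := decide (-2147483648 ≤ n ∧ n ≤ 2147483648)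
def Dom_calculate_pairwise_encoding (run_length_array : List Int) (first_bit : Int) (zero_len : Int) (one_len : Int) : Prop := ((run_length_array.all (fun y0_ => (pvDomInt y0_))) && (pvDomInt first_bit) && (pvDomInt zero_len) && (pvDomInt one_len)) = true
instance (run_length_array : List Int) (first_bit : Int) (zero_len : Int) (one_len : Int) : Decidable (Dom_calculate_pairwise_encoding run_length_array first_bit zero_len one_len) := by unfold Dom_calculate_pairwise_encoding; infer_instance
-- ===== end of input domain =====

-- B replaces A's per-run repeated-subtraction while-loop by a closed-form full-chunk count
-- k = (r-1)//m (when r > m) and one list multiplication of the prebuilt chunk (objective: alternative).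

-- ===== PORT A =====
-- shared module helper num_to_bits(n, num_bits); the assert holds on every call reached
-- inside Pre_ (2**i with i ≥ 0 there, so `.toNat` is exact); `if n & 2**i` tests ≠ 0.
def pv_num_to_bits (n : Int) (num_bits : Int) : List Int :=
  (PySem.List.pyRange (num_bits - 1) (-1) (-1)).map
    (fun i => if PySem.Int.band n (2 ^ i.toNat) ≠ 0 then 1 else 0)

-- A's inner `while r > cur_max_len` loop; fuel = r.toNat suffices inside Pre_ (each pass
-- subtracts cur_max_len ≥ 1); returns the extended `out` and the final r.
def pvLoopA (fuel : Nat) (m bl abl : Int) (r : Int) (out : List Int) : List Int × Int :=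
  match fuel with
  | 0 => (out, r)
  | Nat.succ f =>
      if m < r then
        pvLoopA f m bl abl (r - m) (out ++ pv_num_to_bits m bl ++ pv_num_to_bits 0 abl)
      else (out, r)

-- A's for-loop body (acc = (out, cur_run_bit)); truthiness of cur_run_bit is `≠ 0`.
def pvStepA (maxz maxo zl ol : Int) (acc : List Int × Int) (r : Int) : List Int × Int :=
  let m := if acc.2 ≠ 0 then maxo else maxz
  let bl := if acc.2 ≠ 0 then ol else zl
  let abl := if acc.2 ≠ 0 then zl else ol
  let p := pvLoopA r.toNat m bl abl r acc.1
  (p.1 ++ pv_num_to_bits p.2 bl, 1 - acc.2)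

-- 2**zero_len via `.toNat` (exact for zero_len ≥ 0, which Pre_ guarantees);
-- math.ceil((len+4+4+1)/8) on these ints is the exact ceiling -((-(len+9))//8).
def calculate_pairwise_encoding (run_length_array : List Int) (first_bit : Int) (zero_len : Int) (one_len : Int) : Int × List Int :=
  let max_zeros : Int := 2 ^ zero_len.toNat - 1
  let max_ones : Int := 2 ^ one_len.toNat - 1
  let res := run_length_array.foldl (pvStepA max_zeros max_ones zero_len one_len) ([], first_bit)
  (-(PySem.Int.floordiv (-((res.1.length : Int) + 4 + 4 + 1)) 8), res.1)

-- ===== PORT B =====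
-- B's loop body: params = (max, bit_len, alternate_bit_len) picked by truthiness; closed-form
-- chunk count k; `list * k` is List.replicate/flatten.
def pvStepB (one_params zero_params : Int × Int × Int) (acc : List Int × Int) (r : Int) : List Int × Int :=
  let p := if acc.2 ≠ 0 then one_params else zero_params
  let m := p.1
  let bl := p.2.1
  let abl := p.2.2
  let k : Int := if m < r then PySem.Int.floordiv (r - 1) m else 0
  (acc.1 ++ ((if k ≠ 0 then
        (List.replicate k.toNat (pv_num_to_bits m bl ++ pv_num_to_bits 0 abl)).flatten
      else []) ++ pv_num_to_bits (r - k * m) bl), 1 - acc.2)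

def calculate_pairwise_encoding_alt (run_length_array : List Int) (first_bit : Int) (zero_len : Int) (one_len : Int) : Int × List Int :=
  let one_params : Int × Int × Int := (2 ^ one_len.toNat - 1, one_len, zero_len)
  let zero_params : Int × Int × Int := (2 ^ zero_len.toNat - 1, zero_len, one_len)
  let res := run_length_array.foldl (pvStepB one_params zero_params) ([], first_bit)
  (-(PySem.Int.floordiv (-((res.1.length : Int) + 4 + 4 + 1)) 8), res.1)

-- ===== PRECONDITION & SPEC =====
-- the run bit A's alternation uses at index i (cur_run_bit starts at first_bit, then 1 - cur)
def pvRunBit (first_bit : Int) (i : Nat) : Int := if i % 2 = 0 then first_bit else 1 - first_bit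

-- Pre_ excludes exactly the inputs where A does not return: a negative run makes num_to_bits's
-- assert fail; a run on a side whose bit length is negative raises there too (its 2**len-1 cap
-- is a negative float, so the while-body asserts); a positive run whose side has bit length 0
-- makes A's while-loop subtract 0 forever (and B divide by zero); and a run exceeding its
-- side's cap with the other side's length ≤ -1075 raises (2**len underflows to float 0.0 in
-- num_to_bits(0, len), failing its assert; ≥ -1074 still returns []). A bit length is only
-- constrained where the alternation actually uses it.
def Pre_calculate_pairwise_encoding (run_length_array : List Int) (first_bit : Int) (zero_len : Int) (one_len : Int) : Prop :=
  ∀ i : Nat, (h : i < run_length_array.length) →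
    0 ≤ run_length_array[i] ∧
    (if pvRunBit first_bit i ≠ 0 then
      0 ≤ one_len ∧ (0 < run_length_array[i] → 1 ≤ one_len) ∧
        (2 ^ one_len.toNat - 1 < run_length_array[i] → -1074 ≤ zero_len)
     else
      0 ≤ zero_len ∧ (0 < run_length_array[i] → 1 ≤ zero_len) ∧
        (2 ^ zero_len.toNat - 1 < run_length_array[i] → -1074 ≤ one_len))

instance (run_length_array : List Int) (first_bit : Int) (zero_len : Int) (one_len : Int) : Decidable (Pre_calculate_pairwise_encoding run_length_array first_bit zero_len one_len) := by unfold Pre_calculate_pairwise_encoding; infer_instance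

def pvWitness_calculate_pairwise_encoding : List Int × Int × Int × Int := ([3, 0, 9], 1, 2, 3)

def Spec_calculate_pairwise_encoding (run_length_array : List Int) (first_bit : Int) (zero_len : Int) (one_len : Int) (out : Int × List Int) : Prop := out = calculate_pairwise_encoding_alt run_length_array first_bit zero_len one_len
instance (run_length_array : List Int) (first_bit : Int) (zero_len : Int) (one_len : Int) (out : Int × List Int) : Decidable (Spec_calculate_pairwise_encoding run_length_array first_bit zero_len one_len out) := by unfold Spec_calculate_pairwise_encoding; infer_instance

-- ===== CLAIM (what is proved, stated in full; the proofs are below) =====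
def Claim_equal_calculate_pairwise_encoding : Prop := ∀ (run_length_array : List Int) (first_bit : Int) (zero_len : Int) (one_len : Int), Dom_calculate_pairwise_encoding run_length_array first_bit zero_len one_len → Pre_calculate_pairwise_encoding run_length_array first_bit zero_len one_len → Spec_calculate_pairwise_encoding run_length_array first_bit zero_len one_len (calculate_pairwise_encoding run_length_array first_bit zero_len one_len)

-- ===== LEMMAS AND PROOFS =====

-- B's `if k:` guard is invisible in the result (k = 0 contributes no chunks either way).
theorem pv_guard_flatten (k : Int) (c : List Int) :
    (if k ≠ 0 then (List.replicate k.toNat c).flatten else [])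
      = (List.replicate k.toNat c).flatten := by
  by_cases h : k = 0
  · subst h; simp
  · simp [h]

-- A's chunk count equals B's closed form, peeled one chunk at a time.
theorem pv_k_peel (m r : Int) (hm : 1 ≤ m) (hmr : m < r) :
    PySem.Int.floordiv (r - 1) m
      = (if m < r - m then PySem.Int.floordiv (r - m - 1) m else 0) + 1 := by
  have hm0 : (0:Int) < m := by omega
  rw [PySem.Int.floordiv_eq_ediv_of_pos hm0, PySem.Int.floordiv_eq_ediv_of_pos hm0]
  have h1 : r - 1 = (r - m - 1) + 1 * m := by ring
  rw [h1, Int.add_mul_ediv_right _ _ (by omega : m ≠ 0)]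
  by_cases h : m < r - m
  · simp [h]
  · rw [if_neg h, Int.ediv_eq_zero_of_lt (by omega) (by omega)]

theorem pv_k_nonneg (m r : Int) (hm : 0 ≤ m) :
    0 ≤ (if m < r then PySem.Int.floordiv (r - 1) m else 0) := by
  by_cases h : m < r
  · rw [if_pos h]
    by_cases hm1 : 0 < m
    · rw [PySem.Int.floordiv_eq_ediv_of_pos hm1]
      exact Int.ediv_nonneg (by omega) (by omega)
    · have : m = 0 := by omega
      subst this
      simp [PySem.Int.floordiv]
  · simp [h]

-- the per-run equivalence: A's while-loop result written in B's closed form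
theorem pvLoopA_eq (fuel : Nat) : ∀ (m bl abl r : Int) (out : List Int),
    0 ≤ m → 0 ≤ r → r.toNat ≤ fuel → (0 < r → 1 ≤ m) →
    pvLoopA fuel m bl abl r out
      = (out ++ (List.replicate (if m < r then PySem.Int.floordiv (r - 1) m else 0).toNat
            (pv_num_to_bits m bl ++ pv_num_to_bits 0 abl)).flatten,
         r - (if m < r then PySem.Int.floordiv (r - 1) m else 0) * m) := by
  induction fuel with
  | zero =>
      intro m bl abl r out hm hr hfuel _
      have hr0 : r = 0 := by omega
      subst hr0
      have : ¬ m < 0 := by omega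
      simp [pvLoopA, this]
  | succ f ih =>
      intro m bl abl r out hm hr hfuel hpos
      by_cases hmr : m < r
      · have hm1 : 1 ≤ m := hpos (by omega)
        have step : pvLoopA (Nat.succ f) m bl abl r out
            = pvLoopA f m bl abl (r - m) (out ++ pv_num_to_bits m bl ++ pv_num_to_bits 0 abl) := by
          simp [pvLoopA, hmr]
        rw [step, ih m bl abl (r - m) _ hm (by omega) (by omega) (fun _ => hm1)]
        rw [if_pos hmr, pv_k_peel m r hm1 hmr]
        have hk' : 0 ≤ (if m < r - m then PySem.Int.floordiv (r - m - 1) m else 0) :=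
          pv_k_nonneg m (r - m) hm
        set k' : Int := if m < r - m then PySem.Int.floordiv (r - m - 1) m else 0 with hk'def
        have htn : (k' + 1).toNat = k'.toNat + 1 := by omega
        rw [htn, List.replicate_succ, List.flatten_cons]
        simp only [Prod.mk.injEq]
        constructor
        · simp [List.append_assoc]
        · ring
      · simp [pvLoopA, hmr]

-- truthiness of the shifted run bit
theorem pvRunBit_shift (c : Int) (i : Nat) :
    (pvRunBit (1 - c) i ≠ 0) ↔ (pvRunBit c (i + 1) ≠ 0) := by
  unfold pvRunBit
  rcases Nat.even_or_odd i with h | h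
  · have h0 : i % 2 = 0 := Nat.even_iff.mp h
    have h1 : (i + 1) % 2 = 1 := by omega
    rw [if_pos h0, if_neg (by omega : ¬ (i + 1) % 2 = 0)]
  · have h0 : i % 2 = 1 := Nat.odd_iff.mp h
    rw [if_neg (by omega : ¬ i % 2 = 0), if_pos (by omega : (i + 1) % 2 = 0)]
    omega

-- one step of A's loop equals one step of B's loop
theorem pvStep_eq (maxz maxo zl ol : Int) (acc : List Int × Int) (r : Int)
    (hmz : 0 ≤ maxz) (hmo : 0 ≤ maxo) (hr : 0 ≤ r)
    (hside : 0 < r → if acc.2 ≠ 0 then 1 ≤ maxo else 1 ≤ maxz) :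
    pvStepA maxz maxo zl ol acc r = pvStepB (maxo, ol, zl) (maxz, zl, ol) acc r := by
  by_cases hc : acc.2 ≠ 0
  · have hside' : 0 < r → 1 ≤ maxo := by
      intro h; have := hside h; rwa [if_pos hc] at this
    simp only [pvStepA, pvStepB, if_pos hc, pv_guard_flatten]
    rw [pvLoopA_eq r.toNat maxo ol zl r acc.1 hmo hr (le_refl _) hside']
    simp [List.append_assoc]
  · have hside' : 0 < r → 1 ≤ maxz := by
      intro h; have := hside h; rwa [if_neg hc] at this
    simp only [pvStepA, pvStepB, if_neg hc, pv_guard_flatten]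
    rw [pvLoopA_eq r.toNat maxz zl ol r acc.1 hmz hr (le_refl _) hside']
    simp [List.append_assoc]

-- the folds agree, carrying the alternation invariant through the list
theorem pvFold_eq (maxz maxo zl ol : Int) (hmz : 0 ≤ maxz) (hmo : 0 ≤ maxo) :
    ∀ (l : List Int) (cur : Int) (out : List Int),
    (∀ i : Nat, (h : i < l.length) → 0 ≤ l[i] ∧
        (0 < l[i] → if pvRunBit cur i ≠ 0 then 1 ≤ maxo else 1 ≤ maxz)) →
    l.foldl (pvStepA maxz maxo zl ol) (out, cur)
      = l.foldl (pvStepB (maxo, ol, zl) (maxz, zl, ol)) (out, cur) := by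
  intro l
  induction l with
  | nil => intro cur out _; rfl
  | cons r t ih =>
      intro cur out hpre
      have h0 := hpre 0 (by simp)
      simp only [List.getElem_cons_zero] at h0
      have hcur0 : pvRunBit cur 0 = cur := by simp [pvRunBit]
      have hstep : pvStepA maxz maxo zl ol (out, cur) r
          = pvStepB (maxo, ol, zl) (maxz, zl, ol) (out, cur) r := by
        apply pvStep_eq _ _ _ _ _ _ hmz hmo h0.1
        intro hr
        have := h0.2 hr
        rwa [hcur0] at this
      have hsnd : (pvStepA maxz maxo zl ol (out, cur) r).2 = 1 - cur := rfl
      have htail : ∀ i : Nat, (h : i < t.length) → 0 ≤ t[i] ∧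
          (0 < t[i] → if pvRunBit (1 - cur) i ≠ 0 then 1 ≤ maxo else 1 ≤ maxz) := by
        intro i hi
        have h1 := hpre (i + 1) (by simpa using Nat.succ_lt_succ hi)
        simp only [List.getElem_cons_succ] at h1
        refine ⟨h1.1, fun hpos => ?_⟩
        have := h1.2 hpos
        by_cases hb : pvRunBit (1 - cur) i ≠ 0
        · rw [if_pos hb]
          have hb' : pvRunBit cur (i + 1) ≠ 0 := (pvRunBit_shift cur i).mp hb
          rwa [if_pos hb'] at this
        · rw [if_neg hb]
          have hb' : ¬ pvRunBit cur (i + 1) ≠ 0 := fun h => hb ((pvRunBit_shift cur i).mpr h)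
          rwa [if_neg hb'] at this
      calc (r :: t).foldl (pvStepA maxz maxo zl ol) (out, cur)
          = t.foldl (pvStepA maxz maxo zl ol) (pvStepA maxz maxo zl ol (out, cur) r) := rfl
        _ = t.foldl (pvStepA maxz maxo zl ol)
              (((pvStepA maxz maxo zl ol (out, cur) r).1, 1 - cur)) := by rw [← hsnd]
        _ = t.foldl (pvStepB (maxo, ol, zl) (maxz, zl, ol))
              (((pvStepA maxz maxo zl ol (out, cur) r).1, 1 - cur)) := by
              exact ih (1 - cur) _ htail
        _ = (r :: t).foldl (pvStepB (maxo, ol, zl) (maxz, zl, ol)) (out, cur) := by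
              rw [← hsnd]
              simp [hstep]

theorem pv_one_le_pow_sub_one (l : Int) (hl : 1 ≤ l) : (1:Int) ≤ 2 ^ l.toNat - 1 := by
  have h1 : 1 ≤ l.toNat := by omega
  have : (2:Int) ^ 1 ≤ 2 ^ l.toNat := pow_le_pow_right₀ (by norm_num) h1
  simpa using by omega

theorem pv_zero_le_pow_sub_one (l : Int) : (0:Int) ≤ 2 ^ l.toNat - 1 := by
  have : (1:Int) ≤ 2 ^ l.toNat := one_le_pow₀ (by norm_num)
  omega

-- ===== VERDICT (by name: the statement is the Claim_ definition above) =====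
theorem calculate_pairwise_encoding_spec : Claim_equal_calculate_pairwise_encoding := by
  intro run_length_array first_bit zero_len one_len _ hidx
  unfold Spec_calculate_pairwise_encoding
  unfold calculate_pairwise_encoding calculate_pairwise_encoding_alt
  have hfold := pvFold_eq (2 ^ zero_len.toNat - 1) (2 ^ one_len.toNat - 1) zero_len one_len
    (pv_zero_le_pow_sub_one zero_len) (pv_zero_le_pow_sub_one one_len)
    run_length_array first_bit [] ?_
  · simp only [hfold]
  · intro i hi
    refine ⟨(hidx i hi).1, fun hpos => ?_⟩
    have := (hidx i hi).2
    by_cases hb : pvRunBit first_bit i ≠ 0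
    · rw [if_pos hb] at this ⊢
      exact pv_one_le_pow_sub_one _ (this.2.1 hpos)
    · rw [if_neg hb] at this ⊢
      exact pv_one_le_pow_sub_one _ (this.2.1 hpos)
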